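-- pv_equiv track=rewrite | github.com/posl/comment_recommendation | script/mod_gen/3_time/en/115_D/6.py | burger
-- ===== SOURCE A (Python) =====
-- def burger(n,x):
--     if n==0:
--         return 1
--     elif n==1:
--         return 0
--     else:
--         if x<=2**(n-1):
--             return burger(n-1,x-1)
--         elif x==2**(n-1)+1:
--             return 2**(n-1)
--         else:
--             return 2**(n-1)+burger(n-1,x-2**(n-1)-1)
-- ===== SOURCE B (Python) =====
-- def burger(n, x):
--     # Iterative: thread the added powers of two through an accumulator
--     # instead of A's recursive return chain.
--     total = 0
--     while n >= 2:
--         half = 2 ** (n - 1)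
--         if x <= half:
--             x -= 1
--             n -= 1
--         elif x == half + 1:
--             return total + half
--         else:
--             total += half
--             x -= half + 1
--             n -= 1
--     return total + 1 if n == 0 else total
-- ===== Notes on version B (the rewrite author's own statement) =====
-- stated objective: alternative
-- what changed: Replaced A's recursion (whose return chain sums powers of two on the way back up) by a single while loop that threads the running sum through an accumulator and decrements n in place.
-- outside the precondition, e.g. on burger(-50, 9): A returns 8.864436962241484e-16, B returns 0; on burger(-1, 0): A raises RecursionError, B returns 0; on burger(920, 2): A returns 0, B returns 0
import Mathlib
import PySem

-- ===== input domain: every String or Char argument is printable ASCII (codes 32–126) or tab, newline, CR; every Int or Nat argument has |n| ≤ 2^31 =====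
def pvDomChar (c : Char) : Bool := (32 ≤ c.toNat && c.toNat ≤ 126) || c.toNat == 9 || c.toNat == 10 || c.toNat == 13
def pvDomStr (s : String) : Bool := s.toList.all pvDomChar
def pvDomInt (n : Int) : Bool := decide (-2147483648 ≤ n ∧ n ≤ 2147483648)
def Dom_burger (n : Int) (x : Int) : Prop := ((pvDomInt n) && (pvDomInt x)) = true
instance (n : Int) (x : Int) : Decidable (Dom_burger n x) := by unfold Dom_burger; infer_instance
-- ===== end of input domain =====

-- B replaces A's recursion by a while loop with an accumulator for the added powers of two (alternative decomposition, same O(n) cost).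

-- ===== PORT A =====
-- A recurses on n; for n ≥ 0 the recursion is structural on n, mirrored here on n.toNat.
def burgerNat : Nat → Int → Int
  | 0, _ => 1
  | 1, _ => 0
  | m + 2, x =>
    let h : Int := 2 ^ (m + 1)
    if x ≤ h then burgerNat (m + 1) (x - 1)
    else if x = h + 1 then h
    else h + burgerNat (m + 1) (x - h - 1)

def burger (n : Int) (x : Int) : Int := burgerNat n.toNat x

-- ===== PORT B =====
-- B's while loop, as fuel recursion; n.toNat fuel bounds the number of iterations (n decreases by 1 each round).
def burgerAltGo : Nat → Int → Int → Int → Int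
  | 0, n, _, total => if n = 0 then total + 1 else total
  | f + 1, n, x, total =>
    if 2 ≤ n then
      let half : Int := 2 ^ (n - 1).toNat
      if x ≤ half then burgerAltGo f (n - 1) (x - 1) total
      else if x = half + 1 then total + half
      else burgerAltGo f (n - 1) (x - half - 1) (total + half)
    else if n = 0 then total + 1 else total

def burger_alt (n : Int) (x : Int) : Int := burgerAltGo n.toNat n x 0

-- ===== PRECONDITION & SPEC =====
-- Pre_ excludes n < 0, where Python A either raises RecursionError or (via float 2**(n-1)) returns
-- a float instead of an int, and large n, where A exceeds Python's recursion limit (RecursionError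
-- around n ≈ 1000); 900 is a safe bound.
def Pre_burger (n : Int) (x : Int) : Prop := 0 ≤ n ∧ n ≤ 900
instance (n : Int) (x : Int) : Decidable (Pre_burger n x) := by unfold Pre_burger; infer_instance
def pvWitness_burger : Int × Int := (3, 5)

def Spec_burger (n : Int) (x : Int) (out : Int) : Prop := out = burger_alt n x
instance (n : Int) (x : Int) (out : Int) : Decidable (Spec_burger n x out) := by unfold Spec_burger; infer_instance

-- ===== CLAIM (what is proved, stated in full; the proofs are below) =====
def Claim_equal_burger : Prop := ∀ (n : Int) (x : Int), Dom_burger n x → Pre_burger n x → Spec_burger n x (burger n x)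

-- ===== LEMMAS AND PROOFS =====

-- Loop invariant: with enough fuel, B's loop computes total plus A's recursive value.
lemma burgerAltGo_eq (f : Nat) : ∀ (m : Nat) (x total : Int), m ≤ f →
    burgerAltGo f (m : Int) x total = total + burgerNat m x := by
  induction f with
  | zero =>
    intro m x total h
    obtain rfl : m = 0 := Nat.le_zero.mp h
    simp [burgerAltGo, burgerNat]
  | succ f ih =>
    intro m x total h
    match m with
    | 0 => simp [burgerAltGo, burgerNat]
    | 1 => norm_num [burgerAltGo, burgerNat]
    | m + 2 =>
      have h2 : (2 : Int) ≤ ((m + 2 : Nat) : Int) := by push_cast; omega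
      have hn : ((m + 2 : Nat) : Int) - 1 = ((m + 1 : Nat) : Int) := by push_cast; ring
      simp only [burgerAltGo, burgerNat, if_pos h2, hn, Int.toNat_natCast]
      split_ifs with h3 h4
      · exact ih (m + 1) (x - 1) total (by omega)
      · rfl
      · rw [ih (m + 1) (x - (2:Int)^(m+1) - 1) (total + (2:Int)^(m+1)) (by omega)]
        ring

-- ===== VERDICT (by name: the statement is the Claim_ definition above) =====
theorem burger_spec : Claim_equal_burger := by
  intro n x _ hpre
  unfold Spec_burger burger burger_alt
  have hn : ((n.toNat : Nat) : Int) = n := Int.toNat_of_nonneg hpre.1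
  calc burgerNat n.toNat x = 0 + burgerNat n.toNat x := by ring
    _ = burgerAltGo n.toNat ((n.toNat : Nat) : Int) x 0 := (burgerAltGo_eq n.toNat n.toNat x 0 le_rfl).symm
    _ = burgerAltGo n.toNat n x 0 := by rw [hn]
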